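-- pv_equiv track=rewrite | github.com/ThomasKAtkins/551-project | src/filter_seqs.py | ltfivedels
-- ===== SOURCE A (Python) =====
-- def ltfivedels(seq):
--     consecutive_count = 0
--     for char in seq:
--         if char == 'X':
--             consecutive_count += 1
--             if consecutive_count > 5:
--                 return False
--         else:
--             consecutive_count = 0
--     return True
-- ===== SOURCE B (Python) =====
-- def ltfivedels(seq):
--     return 'XXXXXX' not in seq
-- ===== Notes on version B (the rewrite author's own statement) =====
-- stated objective: faster
-- what changed: Replaces the running consecutive-X counter loop with a single substring membership test, since a run of more than 5 consecutive X characters exists exactly when a 6-X substring occurs in seq.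
import Mathlib
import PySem

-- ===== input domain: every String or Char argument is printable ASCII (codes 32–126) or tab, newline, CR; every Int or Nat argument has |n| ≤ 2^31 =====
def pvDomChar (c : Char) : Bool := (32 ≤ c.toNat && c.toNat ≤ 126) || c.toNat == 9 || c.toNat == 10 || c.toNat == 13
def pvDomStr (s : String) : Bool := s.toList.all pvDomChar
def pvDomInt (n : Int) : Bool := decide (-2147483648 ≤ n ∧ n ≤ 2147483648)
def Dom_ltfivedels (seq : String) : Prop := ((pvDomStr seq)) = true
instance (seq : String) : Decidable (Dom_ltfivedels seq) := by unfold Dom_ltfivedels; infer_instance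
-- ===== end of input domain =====

-- B replaces A's running consecutive-'X' counter with the idiomatic substring test 'XXXXXX' not in seq.


-- ===== PORT A =====
-- the 'for char in seq' loop carrying consecutive_count, with the early 'return False'
def ltfivedelsAux : List Char → Nat → Bool
  | [], _ => true
  | c :: rest, cnt =>
    if c = 'X' then
      if cnt + 1 > 5 then false else ltfivedelsAux rest (cnt + 1)
    else ltfivedelsAux rest 0

def ltfivedels (seq : String) : Bool := ltfivedelsAux seq.toList 0

-- ===== PORT B =====
def ltfivedels_alt (seq : String) : Bool := !(PySem.Str.isIn "XXXXXX" seq)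

-- ===== PRECONDITION & SPEC =====
def Spec_ltfivedels (seq : String) (out : Bool) : Prop := out = ltfivedels_alt seq
instance (seq : String) (out : Bool) : Decidable (Spec_ltfivedels seq out) := by unfold Spec_ltfivedels; infer_instance

-- ===== CLAIM (what is proved, stated in full; the proofs are below) =====
def Claim_equal_ltfivedels : Prop := ∀ (seq : String), Dom_ltfivedels seq → Spec_ltfivedels seq (ltfivedels seq)

-- ===== LEMMAS AND PROOFS =====

-- A's loop returns false iff either the first (6 - cnt) chars continue the current X-run,
-- or 'XXXXXX' occurs somewhere in the remainder.
theorem replicate_prefix_mono {m n : Nat} {x : Char} {l : List Char}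
    (h : List.replicate n x <+: l) (hmn : m ≤ n) : List.replicate m x <+: l := by
  refine List.IsPrefix.trans ?_ h
  exact ⟨List.replicate (n - m) x, by rw [List.replicate_append_replicate]; congr 1; omega⟩

theorem ltfivedelsAux_false_iff (xs : List Char) :
    ∀ cnt : Nat, cnt ≤ 5 →
      (ltfivedelsAux xs cnt = false ↔
        (List.replicate (6 - cnt) 'X' <+: xs ∨ List.replicate 6 'X' <:+: xs)) := by
  induction xs with
  | nil =>
    intro cnt h
    simp only [ltfivedelsAux, List.prefix_nil, List.infix_nil]
    constructor
    · intro hfalse; cases hfalse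
    · rintro (hp | hi)
      · have := congrArg List.length hp; simp at this; omega
      · have := congrArg List.length hi; simp at this
  | cons c rest ih =>
    intro cnt h
    by_cases hc : c = 'X'
    · subst hc
      by_cases h5 : cnt + 1 > 5
      · have hcnt : cnt = 5 := by omega
        subst hcnt
        simp only [ltfivedelsAux, if_pos h5]
        constructor
        · intro _
          exact Or.inl (by simp [List.replicate])
        · intro _; rfl
      · have h5' : cnt + 1 ≤ 5 := by omega
        rw [show ltfivedelsAux ('X' :: rest) cnt = ltfivedelsAux rest (cnt + 1) by
          simp [ltfivedelsAux, h5]]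
        rw [ih (cnt + 1) h5']
        have hrep : List.replicate (6 - cnt) 'X' = 'X' :: List.replicate (6 - (cnt + 1)) 'X' := by
          rw [show 6 - cnt = (6 - (cnt + 1)) + 1 by omega, List.replicate_succ]
        constructor
        · rintro (hp | hi)
          · exact Or.inl (by rw [hrep]; exact List.cons_prefix_cons.mpr ⟨rfl, hp⟩)
          · exact Or.inr (hi.trans (List.suffix_cons _ _).isInfix)
        · rintro (hp | hi)
          · rw [hrep] at hp
            exact Or.inl ((List.cons_prefix_cons.mp hp).2)
          · rcases (List.infix_cons_iff.mp hi) with hp | hi'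
            · have h5x : List.replicate 5 'X' <+: rest := by
                have hr6 : List.replicate 6 'X' = 'X' :: List.replicate 5 'X' := rfl
                rw [hr6] at hp
                exact (List.cons_prefix_cons.mp hp).2
              exact Or.inl (replicate_prefix_mono h5x (by omega))
            · exact Or.inr hi'
    · rw [show ltfivedelsAux (c :: rest) cnt = ltfivedelsAux rest 0 by
        simp [ltfivedelsAux, hc]]
      rw [ih 0 (by omega)]
      constructor
      · rintro (hp | hi)
        · exact Or.inr (hp.isInfix.trans (List.suffix_cons _ _).isInfix)
        · exact Or.inr (hi.trans (List.suffix_cons _ _).isInfix)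
      · rintro (hp | hi)
        · exfalso
          rw [show 6 - cnt = (6 - cnt - 1) + 1 by omega, List.replicate_succ] at hp
          exact hc (List.cons_prefix_cons.mp hp).1.symm
        · rcases List.infix_cons_iff.mp hi with hp | hi'
          · exfalso
            have hr6 : List.replicate 6 'X' = 'X' :: List.replicate 5 'X' := rfl
            rw [hr6] at hp
            exact hc (List.cons_prefix_cons.mp hp).1.symm
          · exact Or.inr hi'

-- ===== VERDICT (by name: the statement is the Claim_ definition above) =====
theorem ltfivedels_spec : Claim_equal_ltfivedels := by
  intro seq _
  unfold Spec_ltfivedels ltfivedels ltfivedels_alt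
  have hkey := ltfivedelsAux_false_iff seq.toList 0 (by omega)
  have hrep : ("XXXXXX" : String).toList = List.replicate 6 'X' := by decide
  cases hA : ltfivedelsAux seq.toList 0 with
  | false =>
    have hinf : List.replicate 6 'X' <:+: seq.toList := by
      rcases hkey.mp hA with hp | hi
      · exact (by simpa using hp : List.replicate 6 'X' <+: seq.toList).isInfix
      · exact hi
    have hb : PySem.Str.isIn "XXXXXX" seq = true := by
      rw [PySem.Str.isIn_eq, PySem.Chars.isIn_iff_infix, hrep]; exact hinf
    rw [hb]; rfl
  | true =>
    have : PySem.Str.isIn "XXXXXX" seq = false := by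
      rw [Bool.eq_false_iff]
      intro habs
      have hinf := (PySem.Str.isIn_iff_infix _ _).mp habs
      rw [hrep] at hinf
      have : ltfivedelsAux seq.toList 0 = false := hkey.mpr (Or.inr hinf)
      rw [hA] at this; cases this
    rw [this]; rfl
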